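-- pv_equiv track=rewrite | github.com/rsprouse/iqutext | interlinearized.py | toSmallCaps
-- ===== SOURCE A (Python) =====
-- def toSmallCaps(word):
--     newword = ''
--     incaps = False          # Are we in a \textsc{} environment already?
--     for idx, char in enumerate(word):
--         try:
--             # Don't convert first letter of capitalized words to small caps, e.g. Iquitos
--             canlower = not word[idx+1] in 'abcdefghijklmnopqrstuvwxyz'
--         except IndexError:
--             canlower = True
--         if canlower and char in 'ABCDEFGHIJKLMNOPQRSTUVWXYZ':
--             if not incaps:
--                 newword += r'\D{'
--                 incaps = True
--             newword += char.lower()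
--         elif char == '.':
--             newword += char
--         else:
--             if incaps:
--                 incaps = False
--                 newword += '}'
--             newword += char
--     if incaps: newword += '}'
--     return newword
-- ===== SOURCE B (Python) =====
-- UPPER = 'ABCDEFGHIJKLMNOPQRSTUVWXYZ'
-- LOWER = 'abcdefghijklmnopqrstuvwxyz'
--
-- def _starts(word, i, n):
--     # A capital here opens/continues a run unless the next char is a lowercase letter.
--     return word[i] in UPPER and not (i + 1 < n and word[i + 1] in LOWER)
--
-- def toSmallCaps(word):
--     out = []
--     i, n = 0, len(word)
--     while i < n:
--         if _starts(word, i, n):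
--             run = []
--             j = i
--             while j < n:
--                 d = word[j]
--                 if d == '.':
--                     run.append('.')
--                 elif _starts(word, j, n):
--                     run.append(d.lower())
--                 else:
--                     break
--                 j += 1
--             out.append('\\D{' + ''.join(run) + '}')
--             i = j
--         else:
--             out.append(word[i])
--             i += 1
--     return ''.join(out)
-- ===== Notes on version B (the rewrite author's own statement) =====
-- stated objective: alternative
-- what changed: A's char-by-char state machine with an incaps flag and a try/except lookahead is replaced by a run-extracting scanner that finds each small-caps run (capitals with the not-followed-by-lowercase rule, plus embedded dots) in one inner scan and emits the whole \D{...} group at once.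
import Mathlib
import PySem

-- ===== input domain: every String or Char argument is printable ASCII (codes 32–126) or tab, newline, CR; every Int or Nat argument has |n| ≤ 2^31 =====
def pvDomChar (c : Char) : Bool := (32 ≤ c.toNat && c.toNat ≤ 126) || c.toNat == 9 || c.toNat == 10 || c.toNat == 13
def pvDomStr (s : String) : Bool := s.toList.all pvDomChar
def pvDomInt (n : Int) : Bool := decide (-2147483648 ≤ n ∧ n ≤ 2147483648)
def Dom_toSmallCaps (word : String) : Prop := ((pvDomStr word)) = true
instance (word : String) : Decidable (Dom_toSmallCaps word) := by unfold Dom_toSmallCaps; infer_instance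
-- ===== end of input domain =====

-- B replaces A's single-pass incaps state machine by a run-extracting scanner (no speed claim); return values agree everywhere.

-- ===== PORT A =====
-- canlower: word[idx+1] not a lowercase letter; IndexError (end of word) => True
def aCanlower (rest : List Char) : Bool :=
  match rest.head? with
  | some c => !("abcdefghijklmnopqrstuvwxyz".toList.contains c)
  | none => true

-- A's for-loop over enumerate(word) with the word[idx+1] lookahead, transcribed as a
-- recursion over the character list carrying (newword, incaps); word[idx+1] is the head
-- of the remaining suffix.
def aLoop : List Char → List Char → Bool → List Char
  | acc, [], incaps => if incaps then acc ++ ['}'] else acc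
  | acc, char :: rest, incaps =>
    if aCanlower rest && "ABCDEFGHIJKLMNOPQRSTUVWXYZ".toList.contains char then
      let st := if !incaps then (acc ++ "\\D{".toList, true) else (acc, incaps)
      aLoop (st.1 ++ [char.toLower]) rest st.2
    else if char = '.' then
      aLoop (acc ++ [char]) rest incaps
    else
      let st := if incaps then (acc ++ ['}'], false) else (acc, incaps)
      aLoop (st.1 ++ [char]) rest st.2

def toSmallCaps (word : String) : String :=
  String.mk (aLoop [] word.toList false)

-- ===== PORT B =====
-- does a capital at the head of this suffix open/continue a small-caps run?
def altStarts (c : Char) (rest : List Char) : Bool :=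
  "ABCDEFGHIJKLMNOPQRSTUVWXYZ".toList.contains c &&
    !(match rest with
      | d :: _ => "abcdefghijklmnopqrstuvwxyz".toList.contains d
      | [] => false)

theorem starts_ne_dot (c : Char) (rest : List Char) (h : altStarts c rest = true) :
    c ≠ '.' := by
  rintro rfl
  have hc : ("ABCDEFGHIJKLMNOPQRSTUVWXYZ".toList.contains '.') = false := by decide
  simp [altStarts, hc] at h

-- extract one run: lowered run contents and the remaining suffix
def altRun : List Char → List Char × List Char
  | [] => ([], [])
  | c :: rest =>
    if c = '.' then
      let p := altRun rest; ('.' :: p.1, p.2)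
    else if altStarts c rest then
      let p := altRun rest; (c.toLower :: p.1, p.2)
    else ([], c :: rest)

theorem altRun_len : ∀ l : List Char, (altRun l).2.length ≤ l.length := by
  intro l
  induction l with
  | nil => simp [altRun]
  | cons c rest ih =>
    simp only [altRun]
    split_ifs <;> simp <;> omega

theorem altRun_dec (c : Char) (rest : List Char) (h : altStarts c rest = true) :
    (altRun (c :: rest)).2.length < (c :: rest).length := by
  have hne : c ≠ '.' := starts_ne_dot c rest h
  simp only [altRun, if_neg hne, if_pos h]
  have := altRun_len rest
  simp
  omega

def altScan : List Char → List Char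
  | [] => []
  | c :: rest =>
    if h : altStarts c rest = true then
      let p := altRun (c :: rest)
      "\\D{".toList ++ p.1 ++ ['}'] ++ altScan p.2
    else c :: altScan rest
  termination_by l => l.length
  decreasing_by
    · exact altRun_dec c rest h
    · simp

def toSmallCaps_alt (word : String) : String :=
  String.mk (altScan word.toList)

-- ===== PRECONDITION & SPEC =====
def Spec_toSmallCaps (word : String) (out : String) : Prop := out = toSmallCaps_alt word
instance (word : String) (out : String) : Decidable (Spec_toSmallCaps word out) := by unfold Spec_toSmallCaps; infer_instance

-- ===== CLAIM (what is proved, stated in full; the proofs are below) =====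
def Claim_equal_toSmallCaps : Prop := ∀ (word : String), Dom_toSmallCaps word → Spec_toSmallCaps word (toSmallCaps word)

-- ===== LEMMAS AND PROOFS =====

-- A's loop condition at a step equals B's run condition
theorem cond_eq (c : Char) (rest : List Char) :
    (aCanlower rest && "ABCDEFGHIJKLMNOPQRSTUVWXYZ".toList.contains c) = altStarts c rest := by
  cases rest <;> simp [aCanlower, altStarts, Bool.and_comm]

-- the two-state simultaneous invariant relating A's state machine to B's run scanner
theorem aLoop_alt : ∀ (l acc : List Char),
    aLoop acc l false = acc ++ altScan l ∧
    aLoop acc l true = acc ++ (altRun l).1 ++ ['}'] ++ altScan (altRun l).2 := by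
  intro l
  induction l with
  | nil => intro acc; simp [aLoop, altScan, altRun]
  | cons c rest ih =>
    intro acc
    by_cases hs : altStarts c rest = true
    · have hc : (aCanlower rest && "ABCDEFGHIJKLMNOPQRSTUVWXYZ".toList.contains c) = true := by
        rw [cond_eq]; exact hs
      have hne : c ≠ '.' := starts_ne_dot c rest hs
      constructor
      · rw [show aLoop acc (c :: rest) false
              = aLoop (acc ++ "\\D{".toList ++ [c.toLower]) rest true from by
            simp only [aLoop, hc]; simp]
        rw [(ih _).2]
        rw [altScan]
        simp only [altRun, if_neg hne, if_pos hs, dif_pos hs]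
        simp
      · rw [show aLoop acc (c :: rest) true = aLoop (acc ++ [c.toLower]) rest true from by
            simp only [aLoop, hc]; simp]
        rw [(ih _).2]
        simp only [altRun, if_neg hne, if_pos hs]
        simp
    · rw [Bool.not_eq_true] at hs
      have hc : (aCanlower rest && "ABCDEFGHIJKLMNOPQRSTUVWXYZ".toList.contains c) = false := by
        rw [cond_eq]; exact hs
      by_cases hd : c = '.'
      · subst hd
        constructor
        · rw [show aLoop acc ('.' :: rest) false = aLoop (acc ++ ['.']) rest false from by
              simp only [aLoop, hc]; simp]
          rw [(ih _).1]
          rw [altScan]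
          simp [hs]
        · rw [show aLoop acc ('.' :: rest) true = aLoop (acc ++ ['.']) rest true from by
              simp only [aLoop, hc]; simp]
          rw [(ih _).2]
          simp only [altRun, if_pos rfl]
          simp
      · constructor
        · rw [show aLoop acc (c :: rest) false = aLoop (acc ++ [c]) rest false from by
              simp only [aLoop, hc]; simp [hd]]
          rw [(ih _).1]
          rw [altScan]
          simp [hs]
        · rw [show aLoop acc (c :: rest) true = aLoop (acc ++ ['}'] ++ [c]) rest false from by
              simp only [aLoop, hc]; simp [hd]]
          rw [(ih _).1]
          simp only [altRun, if_neg hd, if_neg (hs ▸ Bool.false_ne_true : ¬ altStarts c rest = true)]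
          rw [altScan]
          simp [hs]

-- ===== VERDICT (by name: the statement is the Claim_ definition above) =====
theorem toSmallCaps_spec : Claim_equal_toSmallCaps := by
  intro word _
  unfold Spec_toSmallCaps toSmallCaps toSmallCaps_alt
  rw [(aLoop_alt word.toList []).1]
  rfl
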